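-- pv_equiv track=rewrite | github.com/n4r4e/arxiv_inequality | src/analysis.py | count_nested_list_items_with_mapping
-- ===== SOURCE A (Python) =====
-- from collections import Counter, defaultdict
--
-- def count_nested_list_items_with_mapping(papers, field_path, category_mapping=None):
--     all_items = []
--     path_parts = field_path.split('.')
--
--     for paper in papers:
--         current = paper
--         valid_path = True
--
--         # Navigate to nested fields
--         for part in path_parts[:-1]:
--             if part in current:
--                 current = current[part]
--             else:
--                 valid_path = False
--                 break
--
--         if valid_path and path_parts[-1] in current:
--             items = current[path_parts[-1]]
--             if items is not None:
--                 if isinstance(items, list):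
--                     all_items.extend(items)
--                 else:
--                     all_items.append(items)
--
--     # Remove None and empty values
--     all_items = [item for item in all_items if item]
--
--     # Apply category mapping if provided
--     if category_mapping:
--         mapped_items = []
--         for item in all_items:
--             found = False
--             for target, sources in category_mapping.items():
--                 if item in sources:
--                     mapped_items.append(target)
--                     found = True
--                     break
--             if not found:
--                 mapped_items.append(item)
--         all_items = mapped_items
--
--     # Calculate frequencies
--     counter = Counter(all_items)
--     return counter
-- ===== SOURCE B (Python) =====
-- from collections import Counter
--
--
-- def count_nested_list_items_with_mapping(papers, field_path, category_mapping=None):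
--     # Different algorithm: (1) invert category_mapping once into a reverse
--     # dictionary source -> target (first-wins), (2) count RAW truthy items into
--     # a Counter while navigating, (3) aggregate the raw counts per category, so
--     # the mapping is resolved once per DISTINCT item via the reverse dictionary
--     # rather than by scanning the mapping per occurrence, and no intermediate
--     # item list is ever built.
--     parts = field_path.split('.')
--     reverse_index = {}
--     if category_mapping:
--         for target, sources in category_mapping.items():
--             for source in sources:
--                 reverse_index.setdefault(source, target)
--
--     raw_counts = Counter()
--     for paper in papers:
--         found = _dig(paper, parts)
--         if found is None:
--             continue
--         for item in (found if isinstance(found, list) else [found]):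
--             if item:
--                 raw_counts[item] += 1
--
--     result = Counter()
--     for item, n in raw_counts.items():
--         result[reverse_index.get(item, item)] += n
--     return result
--
--
-- def _dig(obj, parts):
--     for part in parts[:-1]:
--         if part not in obj:
--             return None
--         obj = obj[part]
--     return obj[parts[-1]] if parts[-1] in obj else None
-- ===== Notes on version B (the rewrite author's own statement) =====
-- stated objective: alternative
-- what changed: A collects all items, filters, maps each occurrence through a linear scan of category_mapping and counts the mapped list; B inverts the mapping once into a source->target dictionary, counts RAW truthy items into a Counter during traversal, and finally aggregates the raw counts per category, resolving the mapping once per DISTINCT item and building no intermediate item lists.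
import Mathlib
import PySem

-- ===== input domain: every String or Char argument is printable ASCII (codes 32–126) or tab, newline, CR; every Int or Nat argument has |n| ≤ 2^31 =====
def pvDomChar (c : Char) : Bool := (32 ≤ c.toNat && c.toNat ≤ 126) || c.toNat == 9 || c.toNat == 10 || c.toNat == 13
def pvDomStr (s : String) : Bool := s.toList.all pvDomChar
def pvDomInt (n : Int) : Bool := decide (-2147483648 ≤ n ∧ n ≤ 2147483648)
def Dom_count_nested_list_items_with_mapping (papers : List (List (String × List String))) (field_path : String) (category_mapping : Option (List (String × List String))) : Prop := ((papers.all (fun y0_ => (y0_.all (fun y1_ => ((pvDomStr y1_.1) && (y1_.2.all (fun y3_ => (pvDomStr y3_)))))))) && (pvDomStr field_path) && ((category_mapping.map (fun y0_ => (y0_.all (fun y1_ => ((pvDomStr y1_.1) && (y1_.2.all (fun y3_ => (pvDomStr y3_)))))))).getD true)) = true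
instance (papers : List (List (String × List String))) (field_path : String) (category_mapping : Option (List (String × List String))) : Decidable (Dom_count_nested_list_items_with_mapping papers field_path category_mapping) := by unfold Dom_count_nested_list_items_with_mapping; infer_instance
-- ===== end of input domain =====

-- B inverts category_mapping once into a source→target dictionary, counts RAW items first and
-- only then aggregates the counts per category (one mapping resolution per DISTINCT item, no
-- intermediate item lists); objective: alternative algorithm, same proved return value.

-- Python's `current` is either the paper dict or a list of strings after one navigation step.
inductive PVObj
  | dict : List (String × List String) → PVObj
  | slist : List String → PVObj

-- ===== PORT A =====
-- the `for part in path_parts[:-1]` navigation loop; none = `valid_path = False`.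
-- Indexing a list of strings with a string key would be a TypeError in Python; those inputs
-- are excluded by Pre_ below, so the `.slist` case only ever reaches the skip outcome.
def pvNavA : PVObj → List String → Option PVObj
  | cur, [] => some cur
  | .dict m, p :: rest =>
    match m.find? (fun kv => kv.1 == p) with
    | some kv => pvNavA (.slist kv.2) rest
    | none => none
  | .slist _, _ :: _ => none

-- one paper's contribution to all_items; under the type convention `items` is always a list of
-- strings, so `items is not None` and `isinstance(items, list)` are constant-true and we extend
def pvPaperItemsA (paper : List (String × List String)) (parts : List String) : List String :=
  match pvNavA (.dict paper) parts.dropLast with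
  | none => []
  | some (.dict m) =>
    match m.find? (fun kv => kv.1 == PySem.List.pyGetD parts (-1) "") with
    | some kv => kv.2
    | none => []
  | some (.slist _) => []   -- `path_parts[-1] in current` on a list: TypeError (excluded by Pre_) or skip

-- the inner `for target, sources in category_mapping.items(): … break` loop with its found flag
def pvMapItemA (mapping : List (String × List String)) (item : String) : String :=
  match mapping with
  | [] => item
  | (target, sources) :: rest =>
    if sources.contains item then target else pvMapItemA rest item

def count_nested_list_items_with_mapping (papers : List (List (String × List String))) (field_path : String) (category_mapping : Option (List (String × List String))) : List (String × Int) :=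
  let path_parts := (PySem.Str.split? field_path ".").getD []   -- sep "." ≠ "": never none
  let all_items := papers.foldl (fun acc paper => acc ++ pvPaperItemsA paper path_parts) []
  let all_items := all_items.filter (fun item => item != "")    -- `if item`
  let all_items :=
    match category_mapping with                                  -- `if category_mapping:`
    | some m =>
      if m = [] then all_items
      else all_items.foldl (fun acc item => acc ++ [pvMapItemA m item]) []
    | none => all_items
  (PySem.Dict.counter all_items).items                           -- Counter(all_items)

-- ===== PORT B =====
-- _dig: walk the whole path, returning the final field's value (none = absent)
def pvDigB : PVObj → List String → Option (List String)
  | .dict m, [last] => (m.find? (fun kv => kv.1 == last)).map (·.2)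
  | .slist _, [_] => none          -- `last in obj` on a list: TypeError (excluded by Pre_) or absent
  | .dict m, p :: rest =>
    match m.find? (fun kv => kv.1 == p) with
    | some kv => pvDigB (.slist kv.2) rest
    | none => none
  | .slist _, _ :: _ => none       -- `obj[part]` on a list: TypeError (excluded by Pre_) or absent
  | _, [] => none                  -- unreachable: parts is never empty

-- `reverse_index.setdefault(source, target)` over all (target, sources) pairs: first-wins index
def pvRevIndex (m : List (String × List String)) : PySem.Dict String String :=
  m.foldl (fun d ts => ts.2.foldl (fun d s => d.setdefault s ts.1) d) PySem.Dict.empty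

def count_nested_list_items_with_mapping_alt (papers : List (List (String × List String))) (field_path : String) (category_mapping : Option (List (String × List String))) : List (String × Int) :=
  let parts := (PySem.Str.split? field_path ".").getD []
  let rev :=
    match category_mapping with                              -- `if category_mapping:`
    | some m => if m = [] then PySem.Dict.empty else pvRevIndex m
    | none => PySem.Dict.empty
  let raw : PySem.Dict String Int := papers.foldl (fun d paper =>
      match pvDigB (.dict paper) parts with
      | none => d
      | some items =>
        items.foldl (fun d item => if item = "" then d else d.modify item 0 (· + 1)) d)
    PySem.Dict.empty
  (raw.items.foldl (fun r p => r.modify ((rev.get? p.1).getD p.1) 0 (· + p.2))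
    PySem.Dict.empty).items

-- ===== PRECONDITION & SPEC =====
-- Pre_ excludes exactly the inputs on which Python A raises TypeError (so does B): a multi-part
-- field_path whose first part is a key of some paper whose value list contains the second part
-- (Python then indexes a list of strings with a string).
def Pre_count_nested_list_items_with_mapping (papers : List (List (String × List String))) (field_path : String) (category_mapping : Option (List (String × List String))) : Prop :=
  let parts := (PySem.Str.split? field_path ".").getD []
  parts.length ≤ 1 ∨
    ∀ paper ∈ papers,
      (paper.find? (fun kv => kv.1 == parts.getD 0 "")).all
        (fun kv => !(kv.2.contains (parts.getD 1 ""))) = true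
instance (papers : List (List (String × List String))) (field_path : String) (category_mapping : Option (List (String × List String))) : Decidable (Pre_count_nested_list_items_with_mapping papers field_path category_mapping) := by unfold Pre_count_nested_list_items_with_mapping; infer_instance

def pvWitness_count_nested_list_items_with_mapping : (List (List (String × List String))) × String × (Option (List (String × List String))) :=
  ([[("tags", ["a", "b", "a"]), ("kw", ["c"])], [("tags", ["b", ""])]], "tags", some [("g", ["a", "c"])])

def Spec_count_nested_list_items_with_mapping (papers : List (List (String × List String))) (field_path : String) (category_mapping : Option (List (String × List String))) (out : List (String × Int)) : Prop := out = count_nested_list_items_with_mapping_alt papers field_path category_mapping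
instance (papers : List (List (String × List String))) (field_path : String) (category_mapping : Option (List (String × List String))) (out : List (String × Int)) : Decidable (Spec_count_nested_list_items_with_mapping papers field_path category_mapping out) := by unfold Spec_count_nested_list_items_with_mapping; infer_instance

-- ===== CLAIM (what is proved, stated in full; the proofs are below) =====
def Claim_equal_count_nested_list_items_with_mapping : Prop := ∀ (papers : List (List (String × List String))) (field_path : String) (category_mapping : Option (List (String × List String))), Dom_count_nested_list_items_with_mapping papers field_path category_mapping → Pre_count_nested_list_items_with_mapping papers field_path category_mapping → Spec_count_nested_list_items_with_mapping papers field_path category_mapping (count_nested_list_items_with_mapping papers field_path category_mapping)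

-- ===== LEMMAS AND PROOFS =====

-- the mapping as both ports see it (`if m = [] then … else m` collapses)
def pvMI (cm : Option (List (String × List String))) : List (String × List String) :=
  match cm with
  | some m => m
  | none => []

-- the first-match resolver both pipelines implement
def pvResolve (mapping_items : List (String × List String)) (item : String) : String :=
  ((mapping_items.find? (fun ts => ts.2.contains item)).map (·.1)).getD item

-- field_path.split('.') is never the empty list
theorem pv_go_ne : ∀ (sep : List Char) (fuel : Nat) (l cur : List Char) (acc : List (List Char)), PySem.Chars.splitOn.go sep fuel l cur acc ≠ [] := by
  intro sep fuel
  induction fuel with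
  | zero => intro l cur acc; simp [PySem.Chars.splitOn.go]
  | succ n ih =>
    intro l cur acc
    cases l with
    | nil => simp [PySem.Chars.splitOn.go]
    | cons c rest =>
      rw [PySem.Chars.splitOn.go]
      split
      · exact ih _ _ _
      · exact ih _ _ _

theorem pv_split_ne_nil (s : String) : (PySem.Str.split? s ".").getD [] ≠ [] := by
  simp only [PySem.Str.split?, PySem.Chars.split?, PySem.Chars.splitOn]
  simp
  exact pv_go_ne _ _ _ _ _

theorem pvDigB_slist (xs : List String) (ps : List String) : pvDigB (.slist xs) ps = none := by
  match ps with
  | [] => rfl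
  | [p] => rfl
  | p :: q :: rest => rfl

-- the per-paper navigations agree (for a non-empty path)
theorem pv_dig_eq (parts : List String) (hne : parts ≠ []) (paper : List (String × List String)) :
    pvPaperItemsA paper parts = (pvDigB (.dict paper) parts).getD [] := by
  match parts with
  | [p] =>
    cases h : paper.find? (fun kv => kv.1 == p) <;>
      simp [pvPaperItemsA, pvDigB, pvNavA, h, PySem.List.pyGetD, PySem.List.pyGet?,
        PySem.List.pyIdx?]
  | p :: q :: rest =>
    have hd : (p :: q :: rest).dropLast = p :: (q :: rest).dropLast := rfl
    simp only [pvPaperItemsA, pvDigB, hd, pvNavA]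
    cases h : paper.find? (fun kv => kv.1 == p) with
    | none => rfl
    | some kv =>
      simp only [pvDigB_slist, Option.getD_none]
      match rest with
      | [] => rfl
      | r :: t => rfl

-- A's linear scan computes the first-match resolver
theorem pv_mapItemA_eq (m : List (String × List String)) (item : String) :
    pvMapItemA m item = pvResolve m item := by
  induction m with
  | nil => rfl
  | cons ts rest ih =>
    obtain ⟨t, s⟩ := ts
    by_cases h : item ∈ s
    · simp [pvMapItemA, pvResolve, List.find?, h]
    · simp only [pvMapItemA, pvResolve, List.find?, h, List.contains_eq_mem, decide_false,
        Bool.false_eq_true, if_false]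
      rw [ih]
      simp [pvResolve, List.contains_eq_mem]

-- setdefault loop over one sources list
theorem pv_setdefault_fold_get? (ss : List String) (t : String) (d : PySem.Dict String String) (item : String) :
    (ss.foldl (fun d s => d.setdefault s t) d).get? item
      = (d.get? item).orElse (fun _ => if ss.contains item then some t else none) := by
  induction ss generalizing d with
  | nil => cases hd : d.get? item <;> simp [hd]
  | cons s ss ih =>
    rw [List.foldl_cons, ih]
    by_cases h : item = s
    · subst h
      rw [PySem.Dict.get?_setdefault_self]
      cases hd : d.get? item <;> simp [hd]
    · rw [PySem.Dict.get?_setdefault_of_ne _ _ h]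
      cases hd : d.get? item <;> simp [hd, h]

-- the hash index computes the first-match resolver
theorem pv_revIndex_get (m : List (String × List String)) (d : PySem.Dict String String) (item : String) :
    ((m.foldl (fun d ts => ts.2.foldl (fun d s => d.setdefault s ts.1) d) d).get? item)
      = (d.get? item).orElse (fun _ => (m.find? (fun ts => ts.2.contains item)).map (·.1)) := by
  induction m generalizing d with
  | nil => cases hd : d.get? item <;> simp [hd]
  | cons ts m ih =>
    obtain ⟨t, ss⟩ := ts
    rw [List.foldl_cons, ih, pv_setdefault_fold_get?]
    cases hd : d.get? item with
    | some v => simp [hd]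
    | none =>
      by_cases h : item ∈ ss
      · simp [List.find?, h]
      · simp [List.find?, h]

theorem pv_rev_resolve (m : List (String × List String)) (item : String) :
    (((pvRevIndex m).get? item).getD item) = pvResolve m item := by
  unfold pvRevIndex pvResolve
  rw [pv_revIndex_get]
  simp [PySem.Dict.get?_empty]

theorem pv_ofList_snoc {α : Type} [BEq α] [LawfulBEq α] (l : List α) (x : α) :
    PySem.Set.ofList (l ++ [x]) = PySem.Set.add (PySem.Set.ofList l) x := by
  rw [PySem.Set.ofList_eq_foldl, List.foldl_append, ← PySem.Set.ofList_eq_foldl]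
  rfl

-- ofList commutes with deduplicated mapping (first occurrences are preserved by map)
theorem pv_ofList_map_ofList {α β : Type} [BEq α] [LawfulBEq α] [BEq β] [LawfulBEq β]
    (f : α → β) (xs : List α) :
    PySem.Set.ofList ((PySem.Set.ofList xs).map f) = PySem.Set.ofList (xs.map f) := by
  induction xs using List.reverseRecOn with
  | nil => rfl
  | append_singleton xs x ih =>
    rw [pv_ofList_snoc, List.map_append, List.map_singleton, pv_ofList_snoc]
    by_cases hx : x ∈ xs
    · rw [PySem.Set.add_of_mem (by rwa [PySem.Set.mem_ofList]), ih,
        PySem.Set.add_of_mem (by rw [PySem.Set.mem_ofList]; exact List.mem_map_of_mem hx)]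
    · rw [PySem.Set.add_of_not_mem (by rwa [PySem.Set.mem_ofList]), List.map_append,
        List.map_singleton, pv_ofList_snoc, ih]

-- getD of the aggregation fold
theorem pv_agg_getD (f : String → String) (l : List (String × Int)) (r0 : PySem.Dict String Int) (c : String) :
    (l.foldl (fun r p => r.modify (f p.1) 0 (· + p.2)) r0).getD c 0
      = r0.getD c 0 + ((l.filter (fun p => f p.1 == c)).map (·.2)).sum := by
  induction l generalizing r0 with
  | nil => simp
  | cons p l ih =>
    rw [List.foldl_cons, ih, List.filter_cons]
    by_cases h : f p.1 = c
    · simp only [h, beq_self_eq_true, if_true, List.map_cons, List.sum_cons,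
        PySem.Dict.getD_modify_self]
      ring
    · have hb : (f p.1 == c) = false := by simpa using h
      rw [PySem.Dict.getD_modify_of_ne _ _ _ (fun hc => h hc.symm)]
      simp [hb]

-- a 0/1-indicator summed over a Nodup list containing a
theorem pv_indicator_sum {α : Type} [BEq α] [LawfulBEq α] {f : α → α} {c : α} (ds : List α)
    (hnd : ds.Nodup) {a : α} (ha : a ∈ ds) :
    ((ds.filter (fun k => f k == c)).map (fun k => if a == k then 1 else 0)).sum
      = if f a == c then (1 : Nat) else 0 := by
  induction ds with
  | nil => simp at ha
  | cons d ds ih =>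
    have hnd' := hnd.of_cons
    have hdn : d ∉ ds := (List.nodup_cons.mp hnd).1
    rw [List.filter_cons]
    rcases List.mem_cons.mp ha with h | h
    · subst h
      have hz : ((ds.filter (fun k => f k == c)).map (fun k => if a == k then 1 else 0)).sum = 0 := by
        apply List.sum_eq_zero
        intro x hx
        simp only [List.mem_map] at hx
        obtain ⟨k, hk, hke⟩ := hx
        have : a ≠ k := fun he => hdn (he ▸ List.mem_of_mem_filter hk)
        simpa [this] using hke.symm
      by_cases h : f a = c <;> simp [h, hz]
    · have hda : a ≠ d := fun he => hdn (he ▸ h)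
      by_cases hd : f d = c <;> simp [hd, hda, ih hnd' h]

-- counting mapped occurrences = summing raw counts over the preimage
theorem pv_count_preimage (f : String → String) (c : String) (ds : List String)
    (hnd : ds.Nodup) (xs : List String) (hsub : ∀ x ∈ xs, x ∈ ds) :
    ((ds.filter (fun k => f k == c)).map (fun k => xs.count k)).sum = (xs.map f).count c := by
  induction xs with
  | nil => simp
  | cons a xs ih =>
    have hsub' : ∀ x ∈ xs, x ∈ ds := fun x hx => hsub x (List.mem_cons_of_mem a hx)
    have ha : a ∈ ds := hsub a List.mem_cons_self
    simp only [List.count_cons, List.map_cons]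
    rw [List.sum_map_add (f := fun k => xs.count k) (g := fun k => if a == k then 1 else 0),
      ih hsub', pv_indicator_sum (f := f) (c := c) ds hnd ha]

-- aggregate of the raw counter = counter of the mapped stream
theorem pv_agg_items (f : String → String) (xs : List String) :
    (((PySem.Dict.counter xs).items).foldl (fun r p => r.modify (f p.1) 0 (· + p.2))
        PySem.Dict.empty).items
      = (PySem.Dict.counter (xs.map f)).items := by
  have hkeys : ((PySem.Dict.counter xs).items.foldl
      (fun r p => r.modify (f p.1) 0 (· + p.2)) PySem.Dict.empty).keys
      = PySem.Set.ofList (xs.map f) := by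
    rw [PySem.Dict.keys_foldl_modify_key ((PySem.Dict.counter xs).items) (fun p => f p.1) 0
        (fun _ p => (· + p.2)) PySem.Dict.empty]
    rw [show (PySem.Dict.empty : PySem.Dict String Int).keys = [] from rfl,
      PySem.Set.update_nil_left, PySem.Dict.items_counter, List.map_map]
    exact pv_ofList_map_ofList f xs
  have hnd : ((PySem.Dict.counter xs).items.foldl
      (fun r p => r.modify (f p.1) 0 (· + p.2)) PySem.Dict.empty).keys.Nodup := by
    rw [hkeys]; exact PySem.Set.nodup_ofList _
  have hgetD : ∀ c, ((PySem.Dict.counter xs).items.foldl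
      (fun r p => r.modify (f p.1) 0 (· + p.2)) PySem.Dict.empty).getD c 0
      = (((xs.map f).count c : Nat) : Int) := by
    intro c
    rw [pv_agg_getD, PySem.Dict.getD_empty, PySem.Dict.items_counter, List.filter_map,
      List.map_map, zero_add]
    have : ((fun p : String × Int => p.2) ∘ fun k => (k, (xs.count k : Int)))
        = fun k => ((xs.count k : Nat) : Int) := rfl
    rw [this]
    rw [show ((fun p : String × Int => f p.1 == c) ∘ fun k => (k, ((xs.count k : Nat) : Int)))
        = fun k => f k == c from rfl]
    rw [show (fun k => ((xs.count k : Nat) : Int)) = (Nat.cast : Nat → Int) ∘ (fun k => xs.count k)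
        from rfl, ← List.map_map]
    rw [(Nat.cast_list_sum (R := Int) _).symm]
    rw [pv_count_preimage f c (PySem.Set.ofList xs) (PySem.Set.nodup_ofList xs) xs
        (fun x hx => (PySem.Set.mem_ofList _ _).mpr hx)]
  rw [PySem.Dict.items_eq_map_keys _ hnd 0,
    PySem.Dict.items_eq_map_keys _ (PySem.Dict.nodup_keys_counter (xs.map f)) 0,
    hkeys, PySem.Dict.keys_counter]
  refine List.map_congr_left (fun c _ => ?_)
  rw [hgetD c, PySem.Dict.getD_counter]

-- the falsy-skip loop is a fold over the filtered list
theorem pv_if_skip (items : List String) (g : PySem.Dict String Int → String → PySem.Dict String Int)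
    (d : PySem.Dict String Int) :
    items.foldl (fun d item => if item = "" then d else g d item) d
      = (items.filter (fun it => it != "")).foldl g d := by
  rw [show (fun d item => if item = "" then d else g d item)
      = fun d item => if (item != "") then g d item else d from
    funext fun d => funext fun item => by by_cases h : item = "" <;> simp [h]]
  exact PySem.List.foldl_if_eq_foldl_filter _ _ _ _

-- the raw stream both programs traverse
def pvStream (papers : List (List (String × List String))) (parts : List String) : List String :=
  papers.flatMap (fun paper => (pvPaperItemsA paper parts).filter (fun it => it != ""))

theorem pv_A_eq (papers : List (List (String × List String))) (field_path : String) (cm : Option (List (String × List String))) :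
    count_nested_list_items_with_mapping papers field_path cm
      = (PySem.Dict.counter ((pvStream papers ((PySem.Str.split? field_path ".").getD [])).map
          (pvResolve (pvMI cm)))).items := by
  simp only [count_nested_list_items_with_mapping]
  rw [PySem.List.foldl_append_eq_flatMap, List.nil_append, List.filter_flatMap]
  have hid : (pvResolve [] : String → String) = id := funext fun it => rfl
  cases cm with
  | none =>
    simp only [pvMI, pvStream, hid, List.map_id]
  | some m =>
    by_cases hm : m = []
    · simp only [hm, if_true, pvMI, pvStream, hid, List.map_id]
    · simp only [hm, if_false]
      rw [PySem.List.foldl_append_singleton_eq_map, List.nil_append,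
        show pvMapItemA m = pvResolve m from funext (pv_mapItemA_eq m)]
      rfl

theorem pv_B_eq (papers : List (List (String × List String))) (field_path : String) (cm : Option (List (String × List String))) :
    count_nested_list_items_with_mapping_alt papers field_path cm
      = (((PySem.Dict.counter (pvStream papers ((PySem.Str.split? field_path ".").getD []))).items).foldl
          (fun r p => r.modify (pvResolve (pvMI cm) p.1) 0 (· + p.2)) PySem.Dict.empty).items := by
  simp only [count_nested_list_items_with_mapping_alt]
  have hrev : (match cm with
      | some m => if m = [] then PySem.Dict.empty else pvRevIndex m
      | none => PySem.Dict.empty) = pvRevIndex (pvMI cm) := by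
    cases cm with
    | none => rfl
    | some m =>
      by_cases hm : m = []
      · subst hm; rfl
      · simp [hm, pvMI]
  rw [hrev]
  have hstep : (fun (r : PySem.Dict String Int) (p : String × Int) =>
      r.modify (((pvRevIndex (pvMI cm)).get? p.1).getD p.1) 0 (· + p.2))
      = fun r p => r.modify (pvResolve (pvMI cm) p.1) 0 (· + p.2) :=
    funext fun r => funext fun p => by rw [pv_rev_resolve]
  rw [hstep]
  have hraw : papers.foldl (fun d paper =>
      match pvDigB (.dict paper) ((PySem.Str.split? field_path ".").getD []) with
      | none => d
      | some items =>
        items.foldl (fun d item => if item = "" then d else d.modify item 0 (· + 1)) d)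
      (PySem.Dict.empty : PySem.Dict String Int)
      = PySem.Dict.counter (pvStream papers ((PySem.Str.split? field_path ".").getD [])) := by
    rw [PySem.Dict.counter_eq_foldl, pvStream, List.foldl_flatMap]
    congr 1
    funext d paper
    cases h : pvDigB (.dict paper) ((PySem.Str.split? field_path ".").getD []) with
    | none =>
      simp [pv_dig_eq _ (pv_split_ne_nil field_path) paper, h]
    | some items =>
      dsimp only
      rw [pv_if_skip, pv_dig_eq _ (pv_split_ne_nil field_path) paper, h, Option.getD_some]
  rw [hraw]

-- ===== VERDICT (by name: the statement is the Claim_ definition above) =====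
theorem count_nested_list_items_with_mapping_spec : Claim_equal_count_nested_list_items_with_mapping := by
  intro papers field_path category_mapping _ _
  unfold Spec_count_nested_list_items_with_mapping
  rw [pv_A_eq, pv_B_eq, pv_agg_items]
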